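-- pv_equiv track=rewrite | github.com/AlvaroTrabanco/italo-train-scraper | scraper/normalize_italo.py | infer_rollover_minutes
-- ===== SOURCE A (Python) =====
-- from typing import Any, Dict, List, Optional
--
-- def infer_rollover_minutes(times: List[Optional[int]]) -> List[Optional[int]]:
--     """
--     If times go backwards (e.g. 23:50 -> 00:10), assume midnight rollover and add +24h from that point.
--     Works on minutes list in stop sequence order.
--     """
--     out: List[Optional[int]] = []
--     offset = 0
--     prev: Optional[int] = None
--     for t in times:
--         if t is None:
--             out.append(None)
--             continue
--         val = t + offset
--         if prev is not None and val < prev: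
--             # rollover
--             offset += 1440
--             val = t + offset
--         out.append(val)
--         prev = val
--     return out
-- ===== SOURCE B (Python) =====
-- from typing import List, Optional
--
-- def infer_rollover_minutes(times: List[Optional[int]]) -> List[Optional[int]]:
--     # Two-pass: first count cumulative rollovers per index (comparing raw
--     # values only), then map each value to t + 1440*count.
--     counts = []
--     c = 0
--     prev = None
--     for t in times:
--         if t is not None:
--             if prev is not None and t < prev:
--                 c += 1
--             prev = t
--         counts.append(c)
--     return [None if t is None else t + 1440 * k for t, k in zip(times, counts)]
-- ===== Notes on version B (the rewrite author's own statement) =====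
-- stated objective: alternative
-- what changed: Replaces the single stateful scan (tracking offset-adjusted previous value) with two passes: a scan over raw values counting cumulative rollovers per index, then a stateless zip-map adding 1440*count.
import Mathlib
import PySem

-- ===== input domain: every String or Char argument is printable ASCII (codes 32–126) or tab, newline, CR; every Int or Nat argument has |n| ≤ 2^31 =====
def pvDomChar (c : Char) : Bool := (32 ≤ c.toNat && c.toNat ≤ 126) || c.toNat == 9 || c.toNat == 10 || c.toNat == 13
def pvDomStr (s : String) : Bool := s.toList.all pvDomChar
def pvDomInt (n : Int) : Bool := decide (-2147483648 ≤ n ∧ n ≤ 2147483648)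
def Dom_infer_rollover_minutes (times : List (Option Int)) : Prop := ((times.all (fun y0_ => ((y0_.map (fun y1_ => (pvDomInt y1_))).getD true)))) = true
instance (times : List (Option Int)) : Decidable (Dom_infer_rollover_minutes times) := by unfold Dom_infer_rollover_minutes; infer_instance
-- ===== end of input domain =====

-- B replaces A's single stateful scan by a rollover-count pass plus a stateless zip-map; alternative decomposition, same O(n) cost.
-- ===== PORT A =====
-- A's loop: state = (offset, prev); the output list is built element by element.
def inferA (times : List (Option Int)) (offset : Int) (prev : Option Int) : List (Option Int) :=
  match times with
  | [] => []
  | none :: rest => none :: inferA rest offset prev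
  | some t :: rest =>
    let val := t + offset
    match prev with
    | some p =>
      if val < p then
        -- rollover
        (t + (offset + 1440)) :: inferA rest (offset + 1440) (some (t + (offset + 1440)))
      else
        val :: inferA rest offset (some val)
    | none => val :: inferA rest offset (some val)

def infer_rollover_minutes (times : List (Option Int)) : List (Option Int) :=
  inferA times 0 none

-- ===== PORT B =====
-- First pass of Source B: cumulative rollover count at each index, comparing raw values only.
def countsB (times : List (Option Int)) (c : Int) (prev : Option Int) : List Int :=
  match times with
  | [] => []
  | none :: rest => c :: countsB rest c prev
  | some t :: rest =>
    match prev with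
    | some p =>
      let c' := if t < p then c + 1 else c
      c' :: countsB rest c' (some t)
    | none => c :: countsB rest c (some t)

def infer_rollover_minutes_alt (times : List (Option Int)) : List (Option Int) :=
  (times.zip (countsB times 0 none)).map (fun tk => tk.1.map (fun t => t + 1440 * tk.2))

-- ===== PRECONDITION & SPEC =====
def Spec_infer_rollover_minutes (times : List (Option Int)) (out : List (Option Int)) : Prop := out = infer_rollover_minutes_alt times
instance (times : List (Option Int)) (out : List (Option Int)) : Decidable (Spec_infer_rollover_minutes times out) := by unfold Spec_infer_rollover_minutes; infer_instance

-- ===== CLAIM (what is proved, stated in full; the proofs are below) =====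
def Claim_equal_infer_rollover_minutes : Prop := ∀ (times : List (Option Int)), Dom_infer_rollover_minutes times → Spec_infer_rollover_minutes times (infer_rollover_minutes times)

-- ===== LEMMAS AND PROOFS =====

-- ===== VERDICT (by name: the statement is the Claim_ definition above) =====
-- Invariant linking the two scans: A's offset is 1440*c and A's prev is B's raw prev shifted by the current offset.
theorem inferA_eq_counts (times : List (Option Int)) : ∀ (c : Int) (p : Option Int),
    inferA times (1440 * c) (p.map (fun x => x + 1440 * c)) =
      (times.zip (countsB times c p)).map (fun tk => tk.1.map (fun t => t + 1440 * tk.2)) := by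
  induction times with
  | nil => intro c p; rfl
  | cons hd rest ih =>
    intro c p
    cases hd with
    | none => simp [inferA, countsB, ih c p]
    | some t =>
      cases p with
      | none =>
        simpa [inferA, countsB, mul_comm] using ih c (some t)
      | some q =>
        by_cases h : t < q
        · have hlt : t + 1440 * c < q + 1440 * c := by omega
          have hoff : 1440 * c + 1440 = 1440 * (c + 1) := by ring
          simp only [inferA, countsB, Option.map_some, if_pos hlt, if_pos h, hoff]
          simpa [mul_comm] using ih (c + 1) (some t)
        · have hge : ¬ t + 1440 * c < q + 1440 * c := by omega
          simp only [inferA, countsB, Option.map_some, if_neg hge, if_neg h]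
          simpa [mul_comm] using ih c (some t)

theorem infer_rollover_minutes_spec : Claim_equal_infer_rollover_minutes := by
  intro times _
  unfold Spec_infer_rollover_minutes infer_rollover_minutes infer_rollover_minutes_alt
  simpa using inferA_eq_counts times 0 none
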